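-- pv_equiv track=rewrite | github.com/TianYi0626/EVRPTW_website | backend_django/utils/acovrp.py | check_driving_range_feasibility
-- ===== SOURCE A (Python) =====
-- def check_driving_range_feasibility(route, distance_matrix):
--     current_distance = 0
--     for i in range(len(route) - 1):
--         if route[i] > 1000:
--             current_distance = 0
--         else:
--             travel_distance = distance_matrix[route[i]][route[i + 1]]
--             current_distance += travel_distance
--
--         if current_distance > 120000:
--             return False
--     return True
-- ===== SOURCE B (Python) =====
-- def check_driving_range_feasibility(route, distance_matrix):
--     # Partition the route into subtours at reset nodes (> 1000) and check
--     # each subtour's edge-prefix sums independently from zero.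
--     rest = route
--     while True:
--         k = 0
--         while k < len(rest) and rest[k] <= 1000:
--             k += 1
--         seg = rest[:k + 1]  # the run plus the reset node (or route end) as final destination
--         total = 0
--         for a, b in zip(seg, seg[1:]):
--             total += distance_matrix[a][b]
--             if total > 120000:
--                 return False
--         if k >= len(rest):
--             return True
--         rest = rest[k + 1:]
-- ===== Notes on version B (the rewrite author's own statement) =====
-- stated objective: alternative
-- what changed: A is one flat stateful loop that resets an accumulator at reset nodes; B partitions the route into subtours at reset nodes (>1000) and checks each subtour's edge-prefix sums independently from zero.
-- outside the precondition, e.g. on check_driving_range_feasibility([0, 1, 5], [[0, 200000], [0, 0]]): A returns False, B returns False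
import Mathlib
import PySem

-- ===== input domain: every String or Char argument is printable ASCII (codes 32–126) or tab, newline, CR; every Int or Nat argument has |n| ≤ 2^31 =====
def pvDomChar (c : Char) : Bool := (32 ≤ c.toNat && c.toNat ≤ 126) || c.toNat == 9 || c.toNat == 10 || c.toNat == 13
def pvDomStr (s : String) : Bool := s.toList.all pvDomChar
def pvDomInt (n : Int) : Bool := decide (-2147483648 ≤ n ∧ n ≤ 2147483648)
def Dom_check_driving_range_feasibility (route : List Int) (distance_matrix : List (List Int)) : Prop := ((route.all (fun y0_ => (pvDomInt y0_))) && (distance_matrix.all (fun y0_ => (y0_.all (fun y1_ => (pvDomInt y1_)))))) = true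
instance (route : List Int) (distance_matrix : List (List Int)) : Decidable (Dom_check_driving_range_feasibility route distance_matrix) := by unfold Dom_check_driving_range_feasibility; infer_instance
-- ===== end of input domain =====

-- B partitions the route into subtours at reset nodes (> 1000) and checks each
-- subtour's edge-prefix sums independently from zero; same cost, different structure.

-- total form of distance_matrix[a][b]; exact under Pre_ (both lookups in range)
def pvLookup (dm : List (List Int)) (a b : Int) : Int :=
  match PySem.List.pyGet? dm a with
  | some row => (PySem.List.pyGet? row b).getD 0
  | none => 0

-- ===== PORT A =====
-- A's flat loop over i with a resettable accumulator, as structural recursion on the route.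
def goA (dm : List (List Int)) : List Int → Int → Bool
  | a :: b :: rest, cur =>
    let cur' := if a > 1000 then 0 else cur + pvLookup dm a b
    if cur' > 120000 then false else goA dm (b :: rest) cur'
  | _, _ => true

def check_driving_range_feasibility (route : List Int) (distance_matrix : List (List Int)) : Bool :=
  goA distance_matrix route 0

-- ===== PORT B =====
-- the inner `for a, b in zip(seg, seg[1:])` prefix-sum check of one subtour
def segCheck (dm : List (List Int)) : List Int → Int → Bool
  | a :: b :: rest, total =>
    let total' := total + pvLookup dm a b
    if total' > 120000 then false else segCheck dm (b :: rest) total'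
  | _, _ => true

-- the outer loop: split off the leading run of non-reset nodes (plus its destination), recurse on the remainder
def goB (dm : List (List Int)) (ys : List Int) : Bool :=
  match h : ys.dropWhile (fun x => x ≤ 1000) with
  | [] => segCheck dm (ys.takeWhile (fun x => x ≤ 1000)) 0
  | r :: rest2 =>
    segCheck dm (ys.takeWhile (fun x => x ≤ 1000) ++ [r]) 0 && goB dm rest2
termination_by ys.length
decreasing_by
  have h1 : (ys.dropWhile (fun x => x ≤ 1000)).length ≤ ys.length := ys.length_dropWhile_le _
  rw [h] at h1
  simp at h1
  omega

def check_driving_range_feasibility_alt (route : List Int) (distance_matrix : List (List Int)) : Bool :=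
  goB distance_matrix route

-- ===== PRECONDITION & SPEC =====
def pvValid (dm : List (List Int)) (a b : Int) : Bool :=
  match PySem.List.pyGet? dm a with
  | some row => (PySem.List.pyGet? row b).isSome
  | none => false

-- Pre_ excludes routes whose matrix lookup at some non-reset position is out of range
-- (after Python's negative-index rule), where the Python programs may raise IndexError;
-- it also excludes such routes on which A already returned False before reaching the bad index.
def Pre_check_driving_range_feasibility (route : List Int) (distance_matrix : List (List Int)) : Prop :=
  ∀ i < route.length - 1, route.getD i 0 ≤ 1000 →
    pvValid distance_matrix (route.getD i 0) (route.getD (i + 1) 0) = true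

instance (route : List Int) (distance_matrix : List (List Int)) : Decidable (Pre_check_driving_range_feasibility route distance_matrix) := by
  unfold Pre_check_driving_range_feasibility; infer_instance

def pvWitness_check_driving_range_feasibility : List Int × List (List Int) :=
  ([2000, 0, 1], [[0, 50], [60, 0]])

def Spec_check_driving_range_feasibility (route : List Int) (distance_matrix : List (List Int)) (out : Bool) : Prop := out = check_driving_range_feasibility_alt route distance_matrix
instance (route : List Int) (distance_matrix : List (List Int)) (out : Bool) : Decidable (Spec_check_driving_range_feasibility route distance_matrix out) := by unfold Spec_check_driving_range_feasibility; infer_instance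

-- ===== CLAIM (what is proved, stated in full; the proofs are below) =====
def Claim_equal_check_driving_range_feasibility : Prop := ∀ (route : List Int) (distance_matrix : List (List Int)), Dom_check_driving_range_feasibility route distance_matrix → Pre_check_driving_range_feasibility route distance_matrix → Spec_check_driving_range_feasibility route distance_matrix (check_driving_range_feasibility route distance_matrix)

-- ===== LEMMAS AND PROOFS =====

-- after a reset node the accumulator is irrelevant: A continues as if started fresh
lemma goA_cons_reset (dm : List (List Int)) (r : Int) (rest : List Int) (cur : Int)
    (hr : 1000 < r) : goA dm (r :: rest) cur = goA dm rest 0 := by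
  cases rest with
  | nil => simp [goA]
  | cons b rest' => simp [goA, hr, not_lt.mpr]

-- on a run of non-reset nodes A's loop is exactly the prefix-sum check
lemma goA_run (dm : List (List Int)) :
    ∀ (run : List Int) (cur : Int), (∀ x ∈ run, x ≤ 1000) →
      goA dm run cur = segCheck dm run cur := by
  intro run
  induction run with
  | nil => intro cur _; simp [goA, segCheck]
  | cons a run' ih =>
    intro cur hmem
    cases run' with
    | nil => simp [goA, segCheck]
    | cons b rest =>
      have ha : ¬ a > 1000 := not_lt.mpr (hmem a (by simp))
      simp only [goA, segCheck, ha, if_false]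
      split
      · rfl
      · exact ih _ (fun x hx => hmem x (List.mem_cons_of_mem _ hx))

-- crossing a reset node: A's loop on run ++ r :: rest factors into the subtour check and a fresh start
lemma goA_split (dm : List (List Int)) :
    ∀ (run : List Int) (r : Int) (rest : List Int) (cur : Int),
      (∀ x ∈ run, x ≤ 1000) → 1000 < r →
      goA dm (run ++ r :: rest) cur
        = (segCheck dm (run ++ [r]) cur && goA dm rest 0) := by
  intro run
  induction run with
  | nil =>
    intro r rest cur _ hr
    simp [segCheck, goA_cons_reset dm r rest cur hr]
  | cons a run' ih =>
    intro r rest cur hmem hr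
    have ha : ¬ a > 1000 := not_lt.mpr (hmem a (by simp))
    cases run' with
    | nil =>
      simp only [List.nil_append, List.cons_append, goA, segCheck, ha, if_false]
      split
      · rfl
      · simp [goA_cons_reset dm r rest _ hr]
    | cons b rest' =>
      simp only [List.cons_append, goA, segCheck, ha, if_false]
      split
      · rfl
      · exact ih r rest _ (fun x hx => hmem x (List.mem_cons_of_mem _ hx)) hr

lemma takeWhile_le (ys : List Int) :
    ∀ x ∈ ys.takeWhile (fun x : Int => x ≤ 1000), x ≤ 1000 := by
  intro x hx
  have := List.mem_takeWhile_imp hx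
  exact of_decide_eq_true this

lemma dropWhile_head_gt : ∀ (ys : List Int) (r : Int) (rest : List Int),
    ys.dropWhile (fun x : Int => x ≤ 1000) = r :: rest → 1000 < r := by
  intro ys
  induction ys with
  | nil => intro r rest h; simp at h
  | cons a t ih =>
    intro r rest h
    by_cases ha : a ≤ 1000
    · rw [List.dropWhile_cons_of_pos (by simpa using ha)] at h
      exact ih r rest h
    · rw [List.dropWhile_cons_of_neg (by simpa using ha)] at h
      injection h with h1 _
      omega

lemma goA_eq_goB (dm : List (List Int)) :
    ∀ (n : Nat) (ys : List Int), ys.length ≤ n → goA dm ys 0 = goB dm ys := by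
  intro n
  induction n with
  | zero =>
    intro ys hlen
    have : ys = [] := List.eq_nil_of_length_eq_zero (Nat.le_zero.mp hlen)
    subst this
    rw [goB]
    simp [goA, segCheck]
  | succ n ih =>
    intro ys hlen
    rw [goB]
    split
    · next h =>
      have hys : ys.takeWhile (fun x : Int => x ≤ 1000) = ys := by
        have := List.takeWhile_append_dropWhile (p := fun x : Int => decide (x ≤ 1000)) (l := ys)
        rw [h] at this; simpa using this
      rw [hys, ← goA_run dm ys 0 (by rw [← hys]; exact takeWhile_le ys)]
    · next r rest2 h =>
      have hr : 1000 < r := dropWhile_head_gt ys r rest2 h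
      have hys : ys.takeWhile (fun x : Int => x ≤ 1000) ++ r :: rest2 = ys := by
        have := List.takeWhile_append_dropWhile (p := fun x : Int => decide (x ≤ 1000)) (l := ys)
        rw [h] at this; exact this
      have hlen2 : rest2.length ≤ n := by
        have := congrArg List.length hys
        simp at this
        omega
      calc goA dm ys 0 = goA dm (ys.takeWhile (fun x : Int => x ≤ 1000) ++ r :: rest2) 0 := by rw [hys]
        _ = (segCheck dm (ys.takeWhile (fun x : Int => x ≤ 1000) ++ [r]) 0 && goA dm rest2 0) :=
            goA_split dm _ r rest2 0 (takeWhile_le ys) hr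
        _ = _ := by rw [ih rest2 hlen2]

-- ===== VERDICT (by name: the statement is the Claim_ definition above) =====
theorem check_driving_range_feasibility_spec : Claim_equal_check_driving_range_feasibility := by
  intro route dm _ _
  unfold Spec_check_driving_range_feasibility check_driving_range_feasibility check_driving_range_feasibility_alt
  exact goA_eq_goB dm route.length route le_rfl
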